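-- pv_equiv track=rewrite | github.com/oreyly/jidelnik-multak | FramSVecma.py | RozdelMezerama
-- ===== SOURCE A (Python) =====
-- def RozdelMezerama(hodnota: any, delkaCasti: int = 3, separator: str = " ") -> (str):
--     hodnota:str = str(hodnota)
--
--     delka = len(hodnota)
--
--     vys = ""
--
--     for i in range(delka):
--         if(i % delkaCasti == 0 and i > 0):
--             vys = separator + vys
--
--         vys = hodnota[delka - 1 - i] + vys
--
--     return vys
-- ===== SOURCE B (Python) =====
-- def RozdelMezerama(hodnota: any, delkaCasti: int = 3, separator: str = " ") -> str:
--     s = str(hodnota)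
--     n = len(s)
--     if n == 0:
--         return ""
--     k = abs(delkaCasti)
--     first = n % k  # raises ZeroDivisionError for delkaCasti == 0, like A
--     chunks = [s[:first]] if first else []
--     chunks += [s[i:i + k] for i in range(first, n, k)]
--     return separator.join(chunks)
-- ===== Notes on version B (the rewrite author's own statement) =====
-- stated objective: faster
-- what changed: Replaces the per-character right-to-left loop that repeatedly prepends to a growing string with computing the leftmost group length n % abs(k) once, slicing the string into chunks, and joining them with the separator.
import Mathlib
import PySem

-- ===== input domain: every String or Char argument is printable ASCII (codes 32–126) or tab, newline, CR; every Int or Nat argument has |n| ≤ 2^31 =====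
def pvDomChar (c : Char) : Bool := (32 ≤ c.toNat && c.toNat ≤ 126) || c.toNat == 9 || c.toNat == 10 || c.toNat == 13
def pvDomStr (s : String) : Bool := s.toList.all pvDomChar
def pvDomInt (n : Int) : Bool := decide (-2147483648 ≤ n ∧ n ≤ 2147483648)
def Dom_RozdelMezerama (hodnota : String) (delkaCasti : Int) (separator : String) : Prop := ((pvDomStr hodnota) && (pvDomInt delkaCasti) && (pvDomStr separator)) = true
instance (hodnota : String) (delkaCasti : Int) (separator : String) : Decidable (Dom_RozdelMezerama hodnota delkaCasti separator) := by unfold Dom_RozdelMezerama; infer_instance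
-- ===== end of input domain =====

-- B replaces A's per-character right-to-left loop (string prepending each step) by computing the
-- leftmost group length n % |k| once, slicing into chunks and joining them with the separator.

-- ===== PORT A =====
def RozdelMezerama (hodnota : String) (delkaCasti : Int) (separator : String) : String :=
  let cs := hodnota.toList
  let delka := cs.length
  let vys : List Char := (PySem.List.pyRange 0 (delka : Int) 1).foldl
    (fun vys i =>
      let vys := if PySem.Int.mod i delkaCasti = 0 ∧ 0 < i then separator.toList ++ vys else vys
      -- hodnota[delka - 1 - i]: the index is always in range for i ∈ range(delka); default never read
      PySem.List.pyGetD cs ((delka : Int) - 1 - i) ' ' :: vys) []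
  String.ofList vys

-- ===== PORT B =====
def RozdelMezerama_alt (hodnota : String) (delkaCasti : Int) (separator : String) : String :=
  let s := hodnota.toList
  let n := s.length
  if n = 0 then ""
  else
    let k := delkaCasti.natAbs           -- abs(delkaCasti)
    let first := n % k                   -- Python raises here when delkaCasti = 0 (outside Pre_)
    let chunks : List (List Char) :=
      (if first ≠ 0 then [PySem.List.slice s (some 0) (some (first : Int))] else [])
      ++ (PySem.List.pyRange (first : Int) (n : Int) (k : Int)).map
           (fun i => PySem.List.slice s (some i) (some (i + (k : Int))))
    String.ofList (PySem.Chars.join separator.toList chunks)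

-- ===== PRECONDITION & SPEC =====
-- Pre_ excludes delkaCasti = 0 with a nonempty string, where Python A raises ZeroDivisionError
-- (i % 0); B raises the same exception there.
def Pre_RozdelMezerama (hodnota : String) (delkaCasti : Int) (separator : String) : Prop :=
  delkaCasti ≠ 0 ∨ hodnota = ""
instance (hodnota : String) (delkaCasti : Int) (separator : String) : Decidable (Pre_RozdelMezerama hodnota delkaCasti separator) := by unfold Pre_RozdelMezerama; infer_instance

def pvWitness_RozdelMezerama : String × Int × String := ("1234567", 3, " ")

def Spec_RozdelMezerama (hodnota : String) (delkaCasti : Int) (separator : String) (out : String) : Prop := out = RozdelMezerama_alt hodnota delkaCasti separator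
instance (hodnota : String) (delkaCasti : Int) (separator : String) (out : String) : Decidable (Spec_RozdelMezerama hodnota delkaCasti separator out) := by unfold Spec_RozdelMezerama; infer_instance

-- ===== CLAIM (what is proved, stated in full; the proofs are below) =====
def Claim_equal_RozdelMezerama : Prop := ∀ (hodnota : String) (delkaCasti : Int) (separator : String), Dom_RozdelMezerama hodnota delkaCasti separator → Pre_RozdelMezerama hodnota delkaCasti separator → Spec_RozdelMezerama hodnota delkaCasti separator (RozdelMezerama hodnota delkaCasti separator)

-- ===== LEMMAS AND PROOFS =====

/-- Common form of both programs: each character, with the separator inserted after a character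
exactly when the length of the rest is a positive multiple of `k`. -/
def render (sep : List Char) (k : Nat) : List Char → List Char
  | [] => []
  | c :: ys => c :: ((if k ∣ ys.length ∧ 0 < ys.length then sep else []) ++ render sep k ys)

theorem render_short (sep : List Char) (k : Nat) :
    ∀ cs : List Char, cs.length ≤ k → render sep k cs = cs := by
  intro cs
  induction cs with
  | nil => intro _; rfl
  | cons c ys ih =>
      intro h
      simp only [List.length_cons] at h
      have hys : ¬ (k ∣ ys.length ∧ 0 < ys.length) := by
        rintro ⟨hdvd, hpos⟩
        have := Nat.le_of_dvd hpos hdvd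
        omega
      simp [render, hys, ih (by omega)]

theorem render_append (sep : List Char) (k : Nat) :
    ∀ xs ys : List Char, 0 < xs.length → xs.length ≤ k → k ∣ ys.length → 0 < ys.length →
      render sep k (xs ++ ys) = xs ++ sep ++ render sep k ys := by
  intro xs
  induction xs with
  | nil => intro ys h; simp at h
  | cons x xs ih =>
      intro ys _ hle hdvd hpos
      cases xs with
      | nil => simp [render, hdvd, hpos]
      | cons x' xs' =>
          have hnd : ¬ (k ∣ (x' :: xs' ++ ys).length ∧ 0 < (x' :: xs' ++ ys).length) := by
            rintro ⟨hd, _⟩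
            simp only [List.length_cons, List.length_append] at hd hle
            have hd' : k ∣ xs'.length + 1 := (Nat.dvd_add_iff_left hdvd).mpr hd
            have := Nat.le_of_dvd (by omega) hd'
            omega
          have hih := ih ys (by simp) (by simp only [List.length_cons] at hle ⊢; omega) hdvd hpos
          have hstep : render sep k ((x :: x' :: xs') ++ ys)
              = x :: ((if k ∣ (x' :: xs' ++ ys).length ∧ 0 < (x' :: xs' ++ ys).length then sep else [])
                  ++ render sep k (x' :: xs' ++ ys)) := rfl
          rw [hstep, if_neg hnd, List.nil_append, hih]
          simp

theorem aFold_eq_render (cs sep : List Char) (d : Int) (hd : d ≠ 0) :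
    ∀ m, m ≤ cs.length →
      (PySem.List.pyRange 0 (m : Int) 1).foldl
        (fun vys i =>
          let vys := if PySem.Int.mod i d = 0 ∧ 0 < i then sep ++ vys else vys
          PySem.List.pyGetD cs ((cs.length : Int) - 1 - i) ' ' :: vys) []
      = render sep d.natAbs (cs.drop (cs.length - m)) := by
  intro m
  induction m with
  | zero =>
      intro _
      rw [show ((0 : Nat) : Int) = 0 from rfl, PySem.List.pyRange_one_eq_nil (by omega)]
      simp [render, List.drop_length]
  | succ m ih =>
      intro hm
      have hcast : (((m + 1 : Nat)) : Int) = (m : Int) + 1 := by push_cast; ring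
      have hsplit : PySem.List.pyRange 0 ((m + 1 : Nat) : Int) 1
          = PySem.List.pyRange 0 (m : Int) 1 ++ [(m : Int)] := by
        rw [hcast, PySem.List.pyRange_one_succ_right (by positivity)]
      have hmod : (PySem.Int.mod (m : Int) d = 0 ∧ 0 < (m : Int)) ↔ (d.natAbs ∣ m ∧ 0 < m) := by
        rw [PySem.Int.mod_eq_zero_iff_dvd]
        constructor
        · rintro ⟨h1, h2⟩
          exact ⟨Int.natCast_dvd_natCast.mp (Int.natAbs_dvd.mpr h1), by exact_mod_cast h2⟩
        · rintro ⟨h1, h2⟩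
          exact ⟨Int.natAbs_dvd.mp (Int.natCast_dvd_natCast.mpr h1), by exact_mod_cast h2⟩
      have hlt : cs.length - 1 - m < cs.length := by omega
      have hidx : ((cs.length : Int) - 1 - (m : Int)) = ((cs.length - 1 - m : Nat) : Int) := by
        omega
      have hget : PySem.List.pyGetD cs ((cs.length : Int) - 1 - (m : Int)) ' '
          = cs[cs.length - 1 - m]'hlt := by
        rw [hidx, PySem.List.pyGetD_natCast, List.getD_eq_getElem?_getD,
          List.getElem?_eq_getElem hlt, Option.getD_some]
      have hdropcons : cs.drop (cs.length - (m + 1))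
          = cs[cs.length - 1 - m]'hlt :: cs.drop (cs.length - m) := by
        have h1 : cs.length - (m + 1) < cs.length := by omega
        rw [List.drop_eq_getElem_cons h1]
        congr 2
        · omega
        · omega
      have hlenrest : (cs.drop (cs.length - m)).length = m := by
        simp; omega
      rw [hsplit, List.foldl_append, ih (by omega)]
      simp only [List.foldl_cons, List.foldl_nil]
      rw [hget, hdropcons]
      have hrstep : render sep d.natAbs (cs[cs.length - 1 - m]'hlt :: cs.drop (cs.length - m))
          = cs[cs.length - 1 - m]'hlt ::
              ((if d.natAbs ∣ (cs.drop (cs.length - m)).length ∧ 0 < (cs.drop (cs.length - m)).length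
                then sep else []) ++ render sep d.natAbs (cs.drop (cs.length - m))) := rfl
      rw [hrstep, hlenrest]
      by_cases hc : d.natAbs ∣ m ∧ 0 < m
      · rw [if_pos (hmod.mpr hc), if_pos hc]
      · rw [if_neg (fun h => hc (hmod.mp h)), if_neg hc, List.nil_append]

-- B's chunk list, in Nat form.
def bChunks (cs : List Char) (k : Nat) : List (List Char) :=
  (if cs.length % k ≠ 0 then [cs.take (cs.length % k)] else [])
  ++ (List.range (cs.length / k)).map (fun t => (cs.drop (cs.length % k + k * t)).take k)

theorem bChunks_join (sep : List Char) (k : Nat) (hk : 0 < k) :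
    ∀ n (cs : List Char), cs.length = n →
      PySem.Chars.join sep (bChunks cs k) = render sep k cs := by
  intro n
  induction n using Nat.strong_induction_on with
  | _ n ih =>
    intro cs hn
    subst hn
    rcases Nat.eq_zero_or_pos cs.length with h0 | hpos
    · have : cs = [] := List.eq_nil_of_length_eq_zero h0
      subst this
      simp [bChunks, render, PySem.Chars.join, List.intercalate]
    rcases lt_or_ge cs.length k with hnk | hkn
    · -- 0 < cs.length < k : single chunk, no separators
      have hmod : cs.length % k = cs.length := Nat.mod_eq_of_lt (by omega)
      have hdiv : cs.length / k = 0 := Nat.div_eq_of_lt (by omega)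
      have hcsne : cs ≠ [] := by
        intro h; subst h; simp at hpos
      have hb : bChunks cs k = [cs] := by
        unfold bChunks
        rw [hmod, hdiv]
        simp [hcsne, List.take_length]
      rw [hb, PySem.Chars.join_singleton, render_short sep k cs (by omega)]
    · -- k ≤ cs.length : peel the first chunk
      have hfirst_lt : cs.length % k < k := Nat.mod_lt _ hk
      by_cases hf : cs.length % k ≠ 0
      · -- head chunk is the first cs.length % k characters
        have hrlen : (cs.drop (cs.length % k)).length = cs.length - cs.length % k := by simp
        have hrdvd : k ∣ (cs.drop (cs.length % k)).length := by
          rw [hrlen]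
          exact ⟨cs.length / k, by have := Nat.div_add_mod cs.length k; omega⟩
        have hrmod : (cs.drop (cs.length % k)).length % k = 0 := by
          obtain ⟨c, hc⟩ := hrdvd; rw [hc]; exact Nat.mul_mod_right k c
        have hrdivcnt : (cs.drop (cs.length % k)).length / k = cs.length / k := by
          rw [hrlen]
          have h1 : cs.length - cs.length % k = k * (cs.length / k) := by
            have := Nat.div_add_mod cs.length k; omega
          rw [h1, Nat.mul_div_cancel_left _ hk]
        have hrpos : 0 < (cs.drop (cs.length % k)).length := by rw [hrlen]; omega
        have hchunks : bChunks cs k = cs.take (cs.length % k) :: bChunks (cs.drop (cs.length % k)) k := by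
          unfold bChunks
          rw [hrmod, hrdivcnt]
          simp only [hf, if_true, ne_eq, not_true_eq_false, not_false_eq_true, if_false, List.nil_append, List.singleton_append, List.cons.injEq, true_and]
          apply List.map_congr_left
          intro t _
          rw [List.drop_drop]
          congr 2
          omega
        rw [hchunks]
        have hbne : bChunks (cs.drop (cs.length % k)) k ≠ [] := by
          unfold bChunks
          rw [hrmod, hrdivcnt]
          simp only [ne_eq, not_true_eq_false, if_false, List.nil_append]
          intro hemp
          rw [List.map_eq_nil_iff, List.range_eq_nil] at hemp
          have := Nat.one_le_div_iff hk |>.mpr hkn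
          omega
        obtain ⟨p, l', hpl⟩ := List.exists_cons_of_ne_nil hbne
        rw [hpl, PySem.Chars.join_cons_cons, ← hpl,
          ih (cs.drop (cs.length % k)).length (by rw [hrlen]; omega) _ rfl]
        conv_rhs => rw [(List.take_append_drop (cs.length % k) cs).symm]
        rw [render_append sep k _ _ (by simp; omega) (by simp; omega) hrdvd hrpos]
      · -- cs.length % k = 0 : head chunk is the first k characters
        push_neg at hf
        have hkdvdn : k ∣ cs.length := Nat.dvd_of_mod_eq_zero hf
        have hrlen : (cs.drop k).length = cs.length - k := by simp
        have hrdvd : k ∣ (cs.drop k).length := by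
          rw [hrlen]; exact Nat.dvd_sub hkdvdn dvd_rfl
        have hrmod : (cs.drop k).length % k = 0 := by
          obtain ⟨c, hc⟩ := hrdvd; rw [hc]; exact Nat.mul_mod_right k c
        have hndiv : cs.length / k * k = cs.length := Nat.div_mul_cancel hkdvdn
        have hrdivcnt : (cs.drop k).length / k = cs.length / k - 1 := by
          rw [hrlen]
          have h2 : cs.length - k = k * (cs.length / k - 1) := by
            rw [Nat.mul_sub, Nat.mul_one, Nat.mul_comm, hndiv]
          rw [h2, Nat.mul_div_cancel_left _ hk]
        have hcpos : 1 ≤ cs.length / k := Nat.one_le_div_iff hk |>.mpr hkn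
        have hchunks : bChunks cs k = cs.take k :: bChunks (cs.drop k) k := by
          unfold bChunks
          rw [hrmod, hrdivcnt, hf]
          simp only [ne_eq, not_true_eq_false, if_false, List.nil_append]
          rw [show cs.length / k = (cs.length / k - 1) + 1 by omega, List.range_succ_eq_map]
          simp only [Nat.add_sub_cancel, List.map_cons, List.map_map]
          congr 1
          apply List.map_congr_left
          intro t _
          simp only [Function.comp_apply, Nat.succ_eq_add_one, List.drop_drop]
          congr 2
          ring
        rw [hchunks]
        rcases Nat.eq_zero_or_pos (cs.drop k).length with hr0 | hrpos
        · -- cs.length = k : single chunk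
          have hbnil : bChunks (cs.drop k) k = [] := by
            have hrestnil : cs.drop k = [] := List.eq_nil_of_length_eq_zero hr0
            simp [bChunks, hrestnil]
          rw [hbnil, PySem.Chars.join_singleton]
          have htk : cs.take k = cs := List.take_of_length_le (by omega)
          exact htk.trans (render_short sep k cs (by omega)).symm
        · have hbne : bChunks (cs.drop k) k ≠ [] := by
            unfold bChunks
            rw [hrmod, hrdivcnt]
            simp only [ne_eq, not_true_eq_false, if_false, List.nil_append]
            intro hemp
            rw [List.map_eq_nil_iff, List.range_eq_nil] at hemp
            have h3 : k ≤ (cs.drop k).length := Nat.le_of_dvd hrpos hrdvd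
            have h4 : k + k ≤ cs.length := by rw [hrlen] at h3; omega
            have h5 : 2 * k ≤ cs.length := by omega
            have h6 : 2 ≤ cs.length / k := by
              calc 2 = 2 * k / k := by rw [Nat.mul_div_cancel _ hk]
              _ ≤ cs.length / k := Nat.div_le_div_right h5
            omega
          obtain ⟨p, l', hpl⟩ := List.exists_cons_of_ne_nil hbne
          rw [hpl, PySem.Chars.join_cons_cons, ← hpl,
            ih (cs.drop k).length (by rw [hrlen]; omega) _ rfl]
          conv_rhs => rw [(List.take_append_drop k cs).symm]
          rw [render_append sep k _ _ (by simp; omega) (by simp) hrdvd hrpos]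

-- Bridge: the B port's chunk list is bChunks.
theorem alt_chunks_eq (cs : List Char) (k : Nat) (hk : 0 < k) :
    ((if cs.length % k ≠ 0 then [PySem.List.slice cs (some 0) (some ((cs.length % k : Nat) : Int))] else [])
      ++ (PySem.List.pyRange ((cs.length % k : Nat) : Int) ((cs.length : Nat) : Int) ((k : Nat) : Int)).map
           (fun i => PySem.List.slice cs (some i) (some (i + (k : Int)))))
      = bChunks cs k := by
  have hfle : cs.length % k ≤ cs.length := Nat.mod_le _ _
  have hhead : (if cs.length % k ≠ 0 then [PySem.List.slice cs (some 0) (some ((cs.length % k : Nat) : Int))] else [])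
      = (if cs.length % k ≠ 0 then [cs.take (cs.length % k)] else []) := by
    by_cases hf : cs.length % k ≠ 0
    · rw [if_pos hf, if_pos hf]
      have h := PySem.List.slice_natCast cs 0 (cs.length % k)
      simp only [Nat.cast_zero, List.drop_zero, Nat.sub_zero] at h
      rw [h]
    · rw [if_neg hf, if_neg hf]
  have htail : (PySem.List.pyRange ((cs.length % k : Nat) : Int) ((cs.length : Nat) : Int) ((k : Nat) : Int)).map
        (fun i => PySem.List.slice cs (some i) (some (i + (k : Int))))
      = (List.range (cs.length / k)).map (fun t => (cs.drop (cs.length % k + k * t)).take k) := by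
    rw [PySem.List.pyRange_of_pos _ _ (by exact_mod_cast hk : (0:Int) < (k : Int))]
    have hcount : (if ((cs.length % k : Nat) : Int) < ((cs.length : Nat) : Int)
          then ((((cs.length : Nat) : Int) - ((cs.length % k : Nat) : Int) + ((k : Nat) : Int) - 1) / ((k : Nat) : Int)).toNat
          else 0)
        = cs.length / k := by
      by_cases hlt : ((cs.length % k : Nat) : Int) < ((cs.length : Nat) : Int)
      · rw [if_pos hlt]
        have hltn : cs.length % k < cs.length := by exact_mod_cast hlt
        have h1 : ((cs.length : Nat) : Int) - ((cs.length % k : Nat) : Int) + ((k : Nat) : Int) - 1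
            = ((cs.length - cs.length % k + k - 1 : Nat) : Int) := by
          push_cast [Nat.cast_sub (le_of_lt hltn)]
          omega
        rw [h1, ← Int.natCast_div, Int.toNat_natCast]
        have hsub : cs.length - cs.length % k = k * (cs.length / k) := by
          have := Nat.div_add_mod cs.length k
          omega
        rw [hsub, show k * (cs.length / k) + k - 1 = (k - 1) + k * (cs.length / k) from by omega,
          Nat.add_mul_div_left _ _ hk, Nat.div_eq_of_lt (by omega), Nat.zero_add]
      · rw [if_neg hlt]
        have hge : cs.length ≤ cs.length % k := by exact_mod_cast not_lt.mp hlt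
        have hnf : cs.length = cs.length % k := le_antisymm hge hfle
        have hlk : cs.length < k := by
          rcases Nat.eq_zero_or_pos cs.length with h0 | hp
          · omega
          · have := Nat.mod_lt cs.length hk
            omega
        rw [Nat.div_eq_of_lt hlk]
    rw [hcount, List.map_map]
    apply List.map_congr_left
    intro t _
    simp only [Function.comp_apply]
    have h1 : ((cs.length % k : Nat) : Int) + ((k : Nat) : Int) * (t : Int)
        = ((cs.length % k + k * t : Nat) : Int) := by push_cast; ring
    have h2 : ((cs.length % k : Nat) : Int) + ((k : Nat) : Int) * (t : Int) + ((k : Nat) : Int)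
        = (((cs.length % k + k * t : Nat) : Int) + ((k : Nat) : Int)) := by push_cast; ring
    rw [h2, h1, PySem.List.slice_natCast_add]
  rw [hhead, htail]
  rfl

-- ===== VERDICT (by name: the statement is the Claim_ definition above) =====
theorem RozdelMezerama_spec : Claim_equal_RozdelMezerama := by
  intro hodnota delkaCasti separator _ hpre
  unfold Spec_RozdelMezerama RozdelMezerama RozdelMezerama_alt
  rcases hpre with hd | hempty
  · by_cases h0 : hodnota.toList.length = 0
    · dsimp only
      simp only [h0]
      rw [show ((0 : Nat) : Int) = 0 from rfl, PySem.List.pyRange_one_eq_nil (by omega)]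
      rfl
    · have hk : 0 < delkaCasti.natAbs := Int.natAbs_pos.mpr hd
      rw [if_neg h0]
      dsimp only
      have hA := aFold_eq_render hodnota.toList separator.toList delkaCasti hd
        hodnota.toList.length (le_refl _)
      rw [Nat.sub_self, List.drop_zero] at hA
      rw [hA, ← bChunks_join separator.toList delkaCasti.natAbs hk hodnota.toList.length
          hodnota.toList rfl,
        ← alt_chunks_eq hodnota.toList delkaCasti.natAbs hk]
  · subst hempty
    rfl
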